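-- pv_equiv track=rewrite | github.com/jmartinmaster/Project-Librarian | project_librarian.py | _summarize_symbol_labels
-- ===== SOURCE A (Python) =====
-- def _format_symbol_label(symbol_record):
--     symbol_name = symbol_record.get("qualified_name") or symbol_record.get("name") or "(unknown)"
--     symbol_kind = symbol_record.get("kind")
--     if symbol_kind:
--         return f"{symbol_name} ({symbol_kind})"
--     return str(symbol_name)
--
-- def _summarize_symbol_labels(symbol_records, limit=4):
--     labels = []
--     seen = set()
--     for symbol_record in symbol_records:
--         label = _format_symbol_label(symbol_record)
--         if label in seen:
--             continue
--         labels.append(label)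
--         seen.add(label)
--         if len(labels) >= max(1, int(limit)):
--             break
--     remaining = max(0, len({ _format_symbol_label(symbol_record) for symbol_record in symbol_records }) - len(labels))
--     if remaining > 0:
--         labels.append(f"and {remaining} more")
--     return ", ".join(labels)
-- ===== SOURCE B (Python) =====
-- def _format_symbol_label(symbol_record):
--     symbol_name = symbol_record.get("qualified_name") or symbol_record.get("name") or "(unknown)"
--     symbol_kind = symbol_record.get("kind")
--     if symbol_kind:
--         return f"{symbol_name} ({symbol_kind})"
--     return str(symbol_name)
--
-- def _summarize_symbol_labels(symbol_records, limit=4):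
--     unique = []
--     seen = set()
--     for symbol_record in symbol_records:
--         label = _format_symbol_label(symbol_record)
--         if label not in seen:
--             seen.add(label)
--             unique.append(label)
--     shown = unique[:max(1, int(limit))]
--     remaining = len(unique) - len(shown)
--     if remaining > 0:
--         shown.append(f"and {remaining} more")
--     return ", ".join(shown)
-- ===== Notes on version B (the rewrite author's own statement) =====
-- stated objective: simpler
-- what changed: One pass collects the full ordered list of unique labels (no early break), then a prefix slice and a length subtraction replace A's break-at-limit loop plus a second full pass that rebuilds the whole label set just to count it.
import Mathlib
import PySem

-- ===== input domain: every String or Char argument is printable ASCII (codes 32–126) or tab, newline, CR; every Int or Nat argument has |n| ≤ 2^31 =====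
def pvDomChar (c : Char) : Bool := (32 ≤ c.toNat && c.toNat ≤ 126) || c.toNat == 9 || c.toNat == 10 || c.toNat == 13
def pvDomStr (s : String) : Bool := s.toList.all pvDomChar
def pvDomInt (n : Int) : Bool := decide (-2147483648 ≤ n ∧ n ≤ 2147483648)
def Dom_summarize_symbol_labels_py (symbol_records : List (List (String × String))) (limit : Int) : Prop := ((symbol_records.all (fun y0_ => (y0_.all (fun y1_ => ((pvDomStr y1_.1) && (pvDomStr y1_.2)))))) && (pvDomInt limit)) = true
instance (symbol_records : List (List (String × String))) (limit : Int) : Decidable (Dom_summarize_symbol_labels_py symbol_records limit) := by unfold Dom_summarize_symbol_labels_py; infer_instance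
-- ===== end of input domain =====

-- B does one pass collecting all unique labels then slices a prefix, instead of A's
-- break-at-limit loop plus a second full pass that rebuilds the label set to count it.

-- ===== PORT A =====
-- _format_symbol_label (identical helper in both Python files)
def pvFmtLabel (symbol_record : List (String × String)) : String :=
  -- d.get(k) or d.get(k') or "(unknown)"  — '' and None are falsy
  let name :=
    match (PySem.Dict.mk symbol_record).get? "qualified_name" with
    | some s => if s = "" then
        (match (PySem.Dict.mk symbol_record).get? "name" with
         | some t => if t = "" then "(unknown)" else t
         | none => "(unknown)")
      else s
    | none =>
        (match (PySem.Dict.mk symbol_record).get? "name" with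
         | some t => if t = "" then "(unknown)" else t
         | none => "(unknown)")
  match (PySem.Dict.mk symbol_record).get? "kind" with
  | some k => if k = "" then name else name ++ " (" ++ k ++ ")"
  | none => name

-- A's for-loop with early break: labels/seen state, stop once len(labels) >= max(1, limit)
def pvLoopA (n : Int) : List (List (String × String)) → List String → PySem.Set String → List String
  | [], labels, _ => labels
  | r :: rest, labels, seen =>
    let label := pvFmtLabel r
    if PySem.Set.contains seen label then pvLoopA n rest labels seen
    else
      let labels' := labels ++ [label]
      if (labels'.length : Int) ≥ n then labels'
      else pvLoopA n rest labels' (PySem.Set.add seen label)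

-- labels = pvLoopA …; total = len({fmt(r) for r in records}); remaining = max(0, total - len(labels));
-- the common subexpressions are written out (no let) so the proof can rewrite them directly
def summarize_symbol_labels_py (symbol_records : List (List (String × String))) (limit : Int) : String :=
  PySem.Str.join ", "
    (if max 0 (((PySem.Set.ofList (symbol_records.map pvFmtLabel)).length : Int)
          - ((pvLoopA (max 1 limit) symbol_records [] PySem.Set.empty).length : Int)) > 0
     then pvLoopA (max 1 limit) symbol_records [] PySem.Set.empty
          ++ ["and " ++ PySem.Int.toStr (max 0 (((PySem.Set.ofList (symbol_records.map pvFmtLabel)).length : Int)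
                - ((pvLoopA (max 1 limit) symbol_records [] PySem.Set.empty).length : Int))) ++ " more"]
     else pvLoopA (max 1 limit) symbol_records [] PySem.Set.empty)

-- ===== PORT B =====
-- single pass collecting every first-occurrence label (unique/seen accumulators)
def pvUniqB : List (List (String × String)) → List String → PySem.Set String → List String
  | [], unique, _ => unique
  | r :: rest, unique, seen =>
    let label := pvFmtLabel r
    if PySem.Set.contains seen label then pvUniqB rest unique seen
    else pvUniqB rest (unique ++ [label]) (PySem.Set.add seen label)

-- unique = pvUniqB …; shown = unique[:max(1, limit)] (bound ≥ 1, so a plain prefix);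
-- remaining = len(unique) - len(shown); common subexpressions written out (no let)
def summarize_symbol_labels_py_alt (symbol_records : List (List (String × String))) (limit : Int) : String :=
  PySem.Str.join ", "
    (if (((pvUniqB symbol_records [] PySem.Set.empty).length : Int)
          - (((pvUniqB symbol_records [] PySem.Set.empty).take (max 1 limit).toNat).length : Int)) > 0
     then (pvUniqB symbol_records [] PySem.Set.empty).take (max 1 limit).toNat
          ++ ["and " ++ PySem.Int.toStr (((pvUniqB symbol_records [] PySem.Set.empty).length : Int)
                - (((pvUniqB symbol_records [] PySem.Set.empty).take (max 1 limit).toNat).length : Int)) ++ " more"]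
     else (pvUniqB symbol_records [] PySem.Set.empty).take (max 1 limit).toNat)

-- ===== PRECONDITION & SPEC =====
def Spec_summarize_symbol_labels_py (symbol_records : List (List (String × String))) (limit : Int) (out : String) : Prop := out = summarize_symbol_labels_py_alt symbol_records limit
instance (symbol_records : List (List (String × String))) (limit : Int) (out : String) : Decidable (Spec_summarize_symbol_labels_py symbol_records limit out) := by unfold Spec_summarize_symbol_labels_py; infer_instance

-- ===== CLAIM (what is proved, stated in full; the proofs are below) =====
def Claim_equal_summarize_symbol_labels_py : Prop := ∀ (symbol_records : List (List (String × String))) (limit : Int), Dom_summarize_symbol_labels_py symbol_records limit → Spec_summarize_symbol_labels_py symbol_records limit (summarize_symbol_labels_py symbol_records limit)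

-- ===== LEMMAS AND PROOFS =====

-- cons-style unique-label list (proof-side normal form of both loops)
def pvUniqC : List (List (String × String)) → PySem.Set String → List String
  | [], _ => []
  | r :: rest, seen =>
    let label := pvFmtLabel r
    if PySem.Set.contains seen label then pvUniqC rest seen
    else label :: pvUniqC rest (PySem.Set.add seen label)

theorem pvUniqB_eq (xs : List (List (String × String))) :
    ∀ (u : List String) (s : PySem.Set String), pvUniqB xs u s = u ++ pvUniqC xs s := by
  induction xs with
  | nil => intro u s; simp [pvUniqB, pvUniqC]
  | cons r rest ih =>
    intro u s
    simp only [pvUniqB, pvUniqC]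
    split
    · exact ih u s
    · rw [ih]; simp

theorem pvLoopA_eq (n : Int) (xs : List (List (String × String))) :
    ∀ (labels : List String) (seen : PySem.Set String), (labels.length : Int) < n →
      pvLoopA n xs labels seen = labels ++ (pvUniqC xs seen).take (n - labels.length).toNat := by
  induction xs with
  | nil => intro labels seen _; simp [pvLoopA, pvUniqC]
  | cons r rest ih =>
    intro labels seen hlt
    simp only [pvLoopA, pvUniqC]
    split
    · exact ih labels seen hlt
    · by_cases hge : ((labels ++ [pvFmtLabel r]).length : Int) ≥ n
      · rw [if_pos hge]
        have h1 : (n - labels.length).toNat = 1 := by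
          simp at hge; omega
        simp [h1]
      · rw [if_neg hge]
        rw [ih (labels ++ [pvFmtLabel r]) _ (by simpa using lt_of_not_ge hge)]
        have h2 : (n - labels.length).toNat = (n - (labels ++ [pvFmtLabel r]).length).toNat + 1 := by
          simp at hge ⊢; omega
        rw [h2, List.take_succ_cons]
        simp

-- the full set of labels has exactly as many elements as the unique-label list
theorem pvSet_eq_uniqC (xs : List (List (String × String))) :
    ∀ (s : PySem.Set String), (xs.map pvFmtLabel).foldl PySem.Set.add s = s ++ pvUniqC xs s := by
  induction xs with
  | nil => intro s; simp [pvUniqC]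
  | cons r rest ih =>
    intro s
    simp only [List.map_cons, List.foldl_cons, pvUniqC]
    by_cases hm : pvFmtLabel r ∈ s
    · have hc : PySem.Set.contains s (pvFmtLabel r) = true := by simpa using hm
      have hadd : PySem.Set.add s (pvFmtLabel r) = s := by simp [PySem.Set.add, hm]
      rw [hadd, ih, hc]
      simp
    · have hc : PySem.Set.contains s (pvFmtLabel r) = false := by simpa using hm
      have hadd : PySem.Set.add s (pvFmtLabel r) = s ++ [pvFmtLabel r] := by
        simp [PySem.Set.add, hm]
      rw [hadd, ih, hc]
      simp

-- ===== VERDICT (by name: the statement is the Claim_ definition above) =====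
theorem summarize_symbol_labels_py_spec : Claim_equal_summarize_symbol_labels_py := by
  intro symbol_records limit _
  unfold Spec_summarize_symbol_labels_py summarize_symbol_labels_py summarize_symbol_labels_py_alt
  have hn : ((([] : List String).length : Int)) < max 1 limit := by
    simp
  rw [pvLoopA_eq (max 1 limit) symbol_records [] PySem.Set.empty hn]
  rw [pvUniqB_eq symbol_records [] PySem.Set.empty]
  have hset : PySem.Set.ofList (symbol_records.map pvFmtLabel)
      = pvUniqC symbol_records PySem.Set.empty := by
    have := pvSet_eq_uniqC symbol_records PySem.Set.empty
    simpa [PySem.Set.ofList_eq_foldl, PySem.Set.empty] using this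
  rw [hset]
  simp only [List.nil_append, List.length_nil, Nat.cast_zero, sub_zero]
  have hmax : max 0 ((((pvUniqC symbol_records PySem.Set.empty).length : Int))
        - (((pvUniqC symbol_records PySem.Set.empty).take (max 1 limit).toNat).length : Int))
      = ((pvUniqC symbol_records PySem.Set.empty).length : Int)
        - (((pvUniqC symbol_records PySem.Set.empty).take (max 1 limit).toNat).length : Int) := by
    have h1 : ((pvUniqC symbol_records PySem.Set.empty).take (max 1 limit).toNat).length
        ≤ (pvUniqC symbol_records PySem.Set.empty).length := by
      simp
    omega
  rw [hmax]
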